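-- pv_equiv track=rewrite | github.com/GilbertoPucciarelli/Proyecto1_Modelacion_de_Sistemas_de_Redes | proyecto1.py | quitarCamino
-- ===== SOURCE A (Python) =====
-- def quitarCamino(camino, matriz,start,end):
--     way=camino.copy()
--     way.remove(start)
--     way.remove(end)
--     #Quitar un camino del grafo
--     for item in way:
--             for i in range(0,len(matriz)):
--                 if i==item:
--                     for j in range(0,len(matriz[i])):
--                         matriz[i][j]=0
--                 matriz[i][item]=0
--     return matriz
-- ===== SOURCE B (Python) =====
-- def quitarCamino(camino, matriz, start, end):
--     way = camino.copy()
--     way.remove(start)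
--     way.remove(end)
--     # Single pass over the matrix: a path row is wiped whole, any other row
--     # gets its path columns zeroed directly.  (Mutates matriz in place, like A.)
--     for i, row in enumerate(matriz):
--         if i in way:
--             row[:] = [0] * len(row)
--         else:
--             for item in way:
--                 row[item] = 0
--     return matriz
-- ===== Notes on version B (the rewrite author's own statement) =====
-- stated objective: simpler
-- what changed: B makes a single pass over the matrix rows (wiping a path row whole, otherwise zeroing the path columns of that row directly), instead of A's loop per path node that scans every row and tests i==item to find the row to wipe.
import Mathlib
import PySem

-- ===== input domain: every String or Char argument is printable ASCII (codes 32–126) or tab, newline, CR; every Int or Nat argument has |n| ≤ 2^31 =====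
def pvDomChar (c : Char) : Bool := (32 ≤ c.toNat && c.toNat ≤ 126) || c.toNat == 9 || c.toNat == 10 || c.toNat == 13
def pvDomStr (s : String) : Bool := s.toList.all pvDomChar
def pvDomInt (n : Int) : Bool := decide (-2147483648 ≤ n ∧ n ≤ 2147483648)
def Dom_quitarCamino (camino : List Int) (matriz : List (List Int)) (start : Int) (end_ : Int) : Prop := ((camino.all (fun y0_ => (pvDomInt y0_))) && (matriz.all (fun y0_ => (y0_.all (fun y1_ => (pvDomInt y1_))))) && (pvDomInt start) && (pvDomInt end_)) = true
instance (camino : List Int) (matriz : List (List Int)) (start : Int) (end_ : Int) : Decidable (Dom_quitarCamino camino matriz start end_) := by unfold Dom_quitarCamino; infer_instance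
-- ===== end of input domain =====

-- B replaces A's per-path-node scan over all rows by one pass over the matrix
-- (wipe a path row whole, otherwise zero the path columns directly): simpler.
-- Both Pythons mutate `matriz` in place identically and mutate neither `camino`
-- nor anything else; the equivalence proved here is about the return value.

-- ===== PORT A =====
def quitarCamino (camino : List Int) (matriz : List (List Int)) (start : Int) (end_ : Int) : List (List Int) :=
  match PySem.List.remove? camino start with
  | none => matriz      -- way.remove(start) raises ValueError (outside Pre_)
  | some w1 =>
    match PySem.List.remove? w1 end_ with
    | none => matriz    -- way.remove(end) raises ValueError (outside Pre_)
    | some way =>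
      way.foldl (fun m item =>
        (PySem.List.pyRange 0 (m.length : Int)).foldl (fun acc i =>
          let acc := if i == item then
              PySem.List.pySetD acc i
                ((PySem.List.pyRange 0 ((PySem.List.pyGetD acc i []).length : Int)).foldl
                  (fun r j => PySem.List.pySetD r j 0) (PySem.List.pyGetD acc i []))
            else acc
          PySem.List.pySetD acc i (PySem.List.pySetD (PySem.List.pyGetD acc i []) item 0)) m) matriz

-- ===== PORT B =====
def quitarCamino_alt (camino : List Int) (matriz : List (List Int)) (start : Int) (end_ : Int) : List (List Int) :=
  match PySem.List.remove? camino start with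
  | none => matriz
  | some w1 =>
    match PySem.List.remove? w1 end_ with
    | none => matriz
    | some way =>
      (PySem.List.enumerate matriz).map (fun p =>
        if way.contains p.1 then List.replicate p.2.length 0
        else way.foldl (fun r item => PySem.List.pySetD r item 0) p.2)

-- ===== PRECONDITION & SPEC =====
-- Pre_ excludes exactly the inputs where the Python A raises: ValueError when
-- start (resp. end) is missing from the path copy, IndexError when some
-- remaining path node is out of range as a column index of some row.
def Pre_quitarCamino (camino : List Int) (matriz : List (List Int)) (start : Int) (end_ : Int) : Prop :=
  start ∈ camino ∧ end_ ∈ camino.erase start ∧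
    ∀ item ∈ (camino.erase start).erase end_, ∀ row ∈ matriz,
      -(row.length : Int) ≤ item ∧ item < (row.length : Int)
instance (camino : List Int) (matriz : List (List Int)) (start : Int) (end_ : Int) : Decidable (Pre_quitarCamino camino matriz start end_) := by unfold Pre_quitarCamino; infer_instance

def pvWitness_quitarCamino : List Int × List (List Int) × Int × Int :=
  ([1, 2, 0], [[7, 8, 9], [4, 5, 6], [1, 2, 3]], 1, 0)

def Spec_quitarCamino (camino : List Int) (matriz : List (List Int)) (start : Int) (end_ : Int) (out : List (List Int)) : Prop := out = quitarCamino_alt camino matriz start end_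
instance (camino : List Int) (matriz : List (List Int)) (start : Int) (end_ : Int) (out : List (List Int)) : Decidable (Spec_quitarCamino camino matriz start end_ out) := by unfold Spec_quitarCamino; infer_instance

-- ===== CLAIM (what is proved, stated in full; the proofs are below) =====
def Claim_equal_quitarCamino : Prop := ∀ (camino : List Int) (matriz : List (List Int)) (start : Int) (end_ : Int), Dom_quitarCamino camino matriz start end_ → Pre_quitarCamino camino matriz start end_ → Spec_quitarCamino camino matriz start end_ (quitarCamino camino matriz start end_)

-- ===== LEMMAS AND PROOFS =====

-- A's inner row-zeroing loop `for j in range(len(row)): row[j] = 0`.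
def pvZeroFold (r : List Int) : List Int :=
  (PySem.List.pyRange 0 (r.length : Int)).foldl (fun r' j => PySem.List.pySetD r' j 0) r

-- A's net effect on row `i` for a single path node `item`.
def pvRowStep (item i : Int) (row : List Int) : List Int :=
  PySem.List.pySetD (if i == item then pvZeroFold row else row) item 0

lemma pvSetD_oob {a : Type} (xs : List a) (i : Int) (v : a) (h : (xs.length : Int) <= i) :
    PySem.List.pySetD xs i v = xs := by
  unfold PySem.List.pySetD
  rw [(PySem.List.pySet?_eq_none_iff xs i v).mpr (by simp [PySem.Raise.InRange]; omega)]
  rfl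

lemma pvGetD_oob {a : Type} (xs : List a) (i : Int) (d : a) (h : (xs.length : Int) <= i) :
    PySem.List.pyGetD xs i d = d := by
  unfold PySem.List.pyGetD
  rw [(PySem.List.pyGet?_eq_none_iff xs i).mpr (by simp [PySem.Raise.InRange]; omega)]
  rfl

lemma pvZeroFold_pre (r : List Int) : ∀ (k : Nat), k <= r.length ->
    (PySem.List.pyRange 0 (k : Int)).foldl (fun r' j => PySem.List.pySetD r' j 0) r
      = List.replicate k 0 ++ r.drop k := by
  intro k
  induction k with
  | zero => intro _; simp [PySem.List.pyRange_one_eq_nil (le_refl (0:Int))]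
  | succ k ih =>
    intro hk
    have hcast : ((k+1 : Nat) : Int) = (k : Int) + 1 := by push_cast; ring
    rw [hcast, PySem.List.pyRange_one_succ_right (by positivity), List.foldl_append,
      ih (Nat.le_of_succ_le hk)]
    simp only [List.foldl_cons, List.foldl_nil]
    rw [PySem.List.pySetD_natCast, List.set_append]
    simp only [List.length_replicate, lt_irrefl, Nat.sub_self]
    rw [List.drop_eq_getElem_cons (by omega), List.set_cons_zero, List.replicate_succ',
      List.append_assoc]
    rfl

lemma pvZeroFold_eq (r : List Int) : pvZeroFold r = List.replicate r.length 0 := by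
  unfold pvZeroFold
  rw [pvZeroFold_pre r r.length le_rfl]
  simp

lemma pvSetD_replicate (n : Nat) (i : Int) :
    PySem.List.pySetD (List.replicate n (0 : Int)) i 0 = List.replicate n 0 := by
  unfold PySem.List.pySetD PySem.List.pySet?
  cases PySem.List.pyIdx? (List.replicate n (0:Int)).length i with
  | none => rfl
  | some k => simp [List.set_replicate_self]

lemma pvRowStep_replicate (a i : Int) (n : Nat) :
    pvRowStep a i (List.replicate n 0) = List.replicate n 0 := by
  unfold pvRowStep
  by_cases h : (i == a) = true
  · rw [if_pos h, pvZeroFold_eq, List.length_replicate]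
    exact pvSetD_replicate n a
  · rw [if_neg h]
    exact pvSetD_replicate n a

lemma pvRowFold_replicate (way : List Int) (n : Nat) (i : Int) :
    way.foldl (fun r item => pvRowStep item i r) (List.replicate n 0) = List.replicate n 0 := by
  induction way with
  | nil => rfl
  | cons a t ih => rw [List.foldl_cons, pvRowStep_replicate, ih]

lemma pvRowFold_hit (way : List Int) (i : Int) : ∀ (row : List Int), i ∈ way ->
    way.foldl (fun r item => pvRowStep item i r) row = List.replicate row.length 0 := by
  induction way with
  | nil => intro row h; cases h
  | cons a t ih =>
    intro row h
    rw [List.foldl_cons]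
    by_cases hia : i = a
    · have hstep : pvRowStep a i row = List.replicate row.length 0 := by
        unfold pvRowStep
        rw [if_pos (by simp [hia]), pvZeroFold_eq]
        exact pvSetD_replicate _ _
      rw [hstep, pvRowFold_replicate]
    · rcases List.mem_cons.mp h with h' | h'
      · exact absurd h' hia
      · have hstep : pvRowStep a i row = PySem.List.pySetD row a 0 := by
          unfold pvRowStep
          rw [if_neg (by simp [hia])]
        rw [hstep, ih _ h', PySem.List.length_pySetD]

lemma pvRowFold_miss (way : List Int) (i : Int) (row : List Int) (h : i ∉ way) :
    way.foldl (fun r item => pvRowStep item i r) row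
      = way.foldl (fun r item => PySem.List.pySetD r item 0) row := by
  apply PySem.List.foldl_congr_mem
  intro acc x hx
  unfold pvRowStep
  rw [if_neg (by simp only [beq_iff_eq]; rintro rfl; exact h hx)]

-- the generic "update each row in place" loop is a map over the enumerated rows
lemma pvFoldRows (g : Int -> List Int -> List Int) :
    ∀ (m pre : List (List Int)),
      (PySem.List.pyRange (pre.length : Int) ((pre.length : Int) + (m.length : Int))).foldl
          (fun acc i => PySem.List.pySetD acc i (g i (PySem.List.pyGetD acc i []))) (pre ++ m)
        = pre ++ (PySem.List.enumerate m (pre.length : Int)).map (fun p => g p.1 p.2) := by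
  intro m
  induction m with
  | nil => intro pre; simp [PySem.List.pyRange_one_eq_nil (le_refl ((pre.length : Int)))]
  | cons r t ih =>
    intro pre
    have hlt : (pre.length : Int) < (pre.length : Int) + ((r::t).length : Int) := by
      simp
    rw [PySem.List.pyRange_one_cons hlt, List.foldl_cons]
    have hget : PySem.List.pyGetD (pre ++ r :: t) (pre.length : Int) [] = r := by
      rw [PySem.List.pyGetD_natCast]
      simp [List.getD_eq_getElem?_getD]
    have hset : PySem.List.pySetD (pre ++ r :: t) (pre.length : Int)
        (g (pre.length : Int) r) = pre ++ g (pre.length : Int) r :: t := by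
      rw [PySem.List.pySetD_natCast, List.set_append]
      simp
    rw [hget, hset]
    have hpm : pre ++ g (pre.length : Int) r :: t = (pre ++ [g (pre.length : Int) r]) ++ t := by
      simp
    have hb1 : (pre.length : Int) + 1 = (((pre ++ [g (pre.length : Int) r]).length : Nat) : Int) := by
      simp
    have hb2 : (pre.length : Int) + ((r::t).length : Int)
        = (((pre ++ [g (pre.length : Int) r]).length : Nat) : Int) + (t.length : Int) := by
      simp
      ring
    rw [hpm, hb1, hb2, ih (pre ++ [g (pre.length : Int) r])]
    simp [PySem.List.enumerate_cons]

lemma pvBody (item : Int) (acc : List (List Int)) (i : Int) (hi : 0 <= i) :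
    (let acc' := if i == item then
        PySem.List.pySetD acc i
          ((PySem.List.pyRange 0 ((PySem.List.pyGetD acc i []).length : Int)).foldl
            (fun r j => PySem.List.pySetD r j 0) (PySem.List.pyGetD acc i []))
      else acc
     PySem.List.pySetD acc' i (PySem.List.pySetD (PySem.List.pyGetD acc' i []) item 0))
    = PySem.List.pySetD acc i (pvRowStep item i (PySem.List.pyGetD acc i [])) := by
  by_cases hit : (i == item) = true
  · simp only [hit, if_pos, pvRowStep]
    by_cases hlen : i < (acc.length : Int)
    · have hz : PySem.List.pyGetD
          (PySem.List.pySetD acc i (pvZeroFold (PySem.List.pyGetD acc i []))) i []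
          = pvZeroFold (PySem.List.pyGetD acc i []) := by
        rw [PySem.List.pySetD_of_nonneg _ _ hi,
          PySem.List.pyGetD_eq_getElem _ _ hi (by simpa using hlen),
          List.getElem_set_self]
      show PySem.List.pySetD (PySem.List.pySetD acc i (pvZeroFold (PySem.List.pyGetD acc i []))) i
          (PySem.List.pySetD (PySem.List.pyGetD
            (PySem.List.pySetD acc i (pvZeroFold (PySem.List.pyGetD acc i []))) i []) item 0) = _
      rw [hz, PySem.List.pySetD_of_nonneg _ _ hi, PySem.List.pySetD_of_nonneg _ _ hi,
        PySem.List.pySetD_of_nonneg _ _ hi, List.set_set]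
    · have hoob : (acc.length : Int) <= i := le_of_not_gt hlen
      have hrow : PySem.List.pyGetD acc i ([] : List Int) = [] := pvGetD_oob acc i [] hoob
      show PySem.List.pySetD (PySem.List.pySetD acc i (pvZeroFold (PySem.List.pyGetD acc i []))) i
          (PySem.List.pySetD (PySem.List.pyGetD
            (PySem.List.pySetD acc i (pvZeroFold (PySem.List.pyGetD acc i []))) i []) item 0) = _
      rw [hrow]
      have hzf : pvZeroFold ([] : List Int) = [] := by rfl
      rw [hzf, pvSetD_oob acc i ([] : List Int) hoob, hrow]
  · simp only [Bool.not_eq_true] at hit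
    simp [hit, pvRowStep]

lemma pvStepA (item : Int) (m : List (List Int)) :
    (PySem.List.pyRange 0 (m.length : Int)).foldl (fun acc i =>
        let acc := if i == item then
            PySem.List.pySetD acc i
              ((PySem.List.pyRange 0 ((PySem.List.pyGetD acc i []).length : Int)).foldl
                (fun r j => PySem.List.pySetD r j 0) (PySem.List.pyGetD acc i []))
          else acc
        PySem.List.pySetD acc i (PySem.List.pySetD (PySem.List.pyGetD acc i []) item 0)) m
      = (PySem.List.enumerate m).map (fun p => pvRowStep item p.1 p.2) := by
  rw [PySem.List.foldl_congr_mem _ _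
      (fun acc i => PySem.List.pySetD acc i (pvRowStep item i (PySem.List.pyGetD acc i []))) _
      (fun acc i hi => pvBody item acc i (PySem.List.mem_pyRange_one.mp hi).1)]
  have h := pvFoldRows (fun i row => pvRowStep item i row) m []
  simpa using h

lemma pvEnumerate_map (f : Int -> List Int -> List Int) :
    ∀ (m : List (List Int)) (s : Int),
      PySem.List.enumerate ((PySem.List.enumerate m s).map (fun p => f p.1 p.2)) s
        = (PySem.List.enumerate m s).map (fun p => (p.1, f p.1 p.2)) := by
  intro m
  induction m with
  | nil => intro s; rfl
  | cons r t ih =>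
    intro s
    simp only [PySem.List.enumerate_cons, List.map_cons, ih (s+1)]

lemma pvFoldWay (way : List Int) :
    ∀ (m : List (List Int)),
      way.foldl (fun m item => (PySem.List.enumerate m).map (fun p => pvRowStep item p.1 p.2)) m
        = (PySem.List.enumerate m).map
            (fun p => way.foldl (fun r item => pvRowStep item p.1 r) p.2) := by
  induction way with
  | nil =>
    intro m
    simp only [List.foldl_nil]
    exact (PySem.List.map_snd_enumerate m 0).symm
  | cons a t ih =>
    intro m
    rw [List.foldl_cons, ih, pvEnumerate_map (fun i r => pvRowStep a i r) m 0, List.map_map]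
    rfl

-- ===== VERDICT (by name: the statement is the Claim_ definition above) =====
set_option maxHeartbeats 1000000 in
theorem quitarCamino_spec : Claim_equal_quitarCamino := by
  intro camino matriz start end_ _ hpre
  obtain ⟨hs, he, hidx⟩ := hpre
  unfold Spec_quitarCamino quitarCamino quitarCamino_alt
  simp only [PySem.List.remove?_eq_some_erase camino start hs,
    PySem.List.remove?_eq_some_erase (camino.erase start) end_ he]
  rw [PySem.List.foldl_congr_mem _ _
      (fun (m : List (List Int)) (item : Int) =>
        (PySem.List.enumerate m).map (fun p => pvRowStep item p.1 p.2)) _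
      (fun m item _ => pvStepA item m),
    pvFoldWay]
  apply List.map_congr_left
  intro p hp
  by_cases hmem : p.1 ∈ (camino.erase start).erase end_
  · rw [if_pos (by simpa using hmem), pvRowFold_hit _ _ _ hmem]
  · rw [if_neg (by simpa using hmem), pvRowFold_miss _ _ _ hmem]
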